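-- pv_equiv track=rewrite | github.com/MontyCarter/CuisineClassifier | lib.py | genIngredMap
-- ===== SOURCE A (Python) =====
-- def genIngredMap(recipes):
--     ingreds = set()
--     # Get a set of all ingredients in use
--     for recipe in recipes:
--         for ingred in recipe['ingredients']:
--             ingreds.add(ingred)
--     # Convert set to sorted list
--     ingreds = sorted(list(ingreds))
--     # Create a dict, indexed by ingredient name
--     # This allows us to look up the vector dimension for a given
--     # ingredient
--     ingredMap = dict()
--     for x in range(len(ingreds)):
--         # Create a dict - 'dim' is dimension number for ingredient
--         # Later we'll add usage count
--         # (i just thought this info was interesting - not super useful)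
--         ingredMap[ingreds[x]] = {'dim':x, 'usageCount':0}
--     # Add the usage counts to the map
--     for recipe in recipes:
--         for ingred in recipe['ingredients']:
--             ingredMap[ingred]['usageCount'] += 1
--     return ingredMap
-- ===== SOURCE B (Python) =====
-- def genIngredMap(recipes):
--     # One pass: count every ingredient occurrence (also yields the distinct names)
--     counts = {}
--     for recipe in recipes:
--         for ingred in recipe['ingredients']:
--             counts[ingred] = counts.get(ingred, 0) + 1
--     # Build the table directly from the sorted counted keys
--     ingredMap = {}
--     for dim, name in enumerate(sorted(counts)):
--         ingredMap[name] = {'dim': dim, 'usageCount': counts[name]}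
--     return ingredMap
-- ===== Notes on version B (the rewrite author's own statement) =====
-- stated objective: simpler
-- what changed: A's three loops (set-gather over recipes, index-loop dict build with zero counts, second recipe pass incrementing counts) are replaced by one counting pass over the recipes plus a single enumerate over the sorted counted keys that writes each entry complete.
import Mathlib
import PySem

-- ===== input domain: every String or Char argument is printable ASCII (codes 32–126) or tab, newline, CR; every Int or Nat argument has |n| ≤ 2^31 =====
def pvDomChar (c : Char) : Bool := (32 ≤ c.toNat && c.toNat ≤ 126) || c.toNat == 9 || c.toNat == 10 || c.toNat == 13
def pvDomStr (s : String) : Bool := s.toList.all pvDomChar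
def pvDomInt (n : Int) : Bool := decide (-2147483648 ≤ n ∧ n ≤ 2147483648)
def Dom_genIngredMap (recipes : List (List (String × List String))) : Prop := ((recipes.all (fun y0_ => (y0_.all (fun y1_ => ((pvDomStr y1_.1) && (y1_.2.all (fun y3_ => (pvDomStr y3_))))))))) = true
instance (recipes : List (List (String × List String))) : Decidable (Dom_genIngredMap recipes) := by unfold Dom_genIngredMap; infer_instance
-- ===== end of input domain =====

-- B replaces A's three loops (set-gather, zero-count table build by index, second counting pass)
-- by one counting pass plus an enumerate over the sorted counted keys: simpler decomposition, same cost.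


-- ===== PORT A =====
-- recipe['ingredients']: first-match lookup; Pre_ guarantees the key is present, so the [] default is never used
def ingredientsOf (recipe : List (String × List String)) : List String :=
  (PySem.Dict.mk recipe).getD "ingredients" []

def genIngredMap (recipes : List (List (String × List String))) : List (String × List (String × Int)) :=
  -- for recipe in recipes: for ingred in recipe['ingredients']: ingreds.add(ingred)
  let ingredsSet : PySem.Set String :=
    recipes.foldl (fun s recipe => (ingredientsOf recipe).foldl PySem.Set.add s) PySem.Set.empty
  -- ingreds = sorted(list(ingreds))
  let ingreds : List String := PySem.List.sorted ingredsSet (fun x => x) false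
  -- for x in range(len(ingreds)): ingredMap[ingreds[x]] = {'dim': x, 'usageCount': 0}
  let m0 : PySem.Dict String (PySem.Dict String Int) :=
    (PySem.List.pyRange 0 (PySem.List.len ingreds) 1).foldl
      (fun d x => d.insert (PySem.List.pyGetD ingreds x "")
        (PySem.Dict.mk [("dim", x), ("usageCount", 0)])) PySem.Dict.empty
  -- for recipe in recipes: for ingred in recipe['ingredients']: ingredMap[ingred]['usageCount'] += 1
  let m : PySem.Dict String (PySem.Dict String Int) :=
    recipes.foldl (fun d recipe =>
      (ingredientsOf recipe).foldl
        (fun d ingred => d.modify ingred PySem.Dict.empty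
          (fun inner => inner.modify "usageCount" 0 (· + 1))) d) m0
  m.items.map (fun p => (p.1, p.2.items))

-- ===== PORT B =====
def genIngredMap_alt (recipes : List (List (String × List String))) : List (String × List (String × Int)) :=
  -- counts[ingred] = counts.get(ingred, 0) + 1 over one pass
  let counts : PySem.Dict String Int :=
    recipes.foldl (fun d recipe =>
      (ingredientsOf recipe).foldl (fun d i => d.insert i (d.getD i 0 + 1)) d) PySem.Dict.empty
  -- for dim, name in enumerate(sorted(counts)): ingredMap[name] = {'dim': dim, 'usageCount': counts[name]}
  -- counts[name]: name is always a key of counts, so the 0 default is never used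
  let m : PySem.Dict String (List (String × Int)) :=
    (PySem.List.enumerate (PySem.List.sorted counts.keys (fun x => x) false) 0).foldl
      (fun d p => d.insert p.2 [("dim", p.1), ("usageCount", counts.getD p.2 0)]) PySem.Dict.empty
  m.items

-- ===== PRECONDITION & SPEC =====
-- Pre_ excludes exactly the inputs where a recipe lacks the 'ingredients' key, on which Python A (and B) raise KeyError.
def Pre_genIngredMap (recipes : List (List (String × List String))) : Prop :=
  ∀ r ∈ recipes, "ingredients" ∈ r.map Prod.fst
instance (recipes : List (List (String × List String))) : Decidable (Pre_genIngredMap recipes) := by unfold Pre_genIngredMap; infer_instance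
def pvWitness_genIngredMap : (List (List (String × List String))) :=
  [[("ingredients", ["b", "a", "b"])], [("ingredients", ["a"])]]

def Spec_genIngredMap (recipes : List (List (String × List String))) (out : List (String × List (String × Int))) : Prop := out = genIngredMap_alt recipes
instance (recipes : List (List (String × List String))) (out : List (String × List (String × Int))) : Decidable (Spec_genIngredMap recipes out) := by unfold Spec_genIngredMap; infer_instance

-- ===== CLAIM (what is proved, stated in full; the proofs are below) =====
def Claim_equal_genIngredMap : Prop := ∀ (recipes : List (List (String × List String))), Dom_genIngredMap recipes → Pre_genIngredMap recipes → Spec_genIngredMap recipes (genIngredMap recipes)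

-- ===== LEMMAS AND PROOFS =====

-- the flat stream of ingredient occurrences, in traversal order
def ingredStream (recipes : List (List (String × List String))) : List String :=
  recipes.flatMap ingredientsOf

theorem nested_foldl_eq_stream {σ : Type} (recipes : List (List (String × List String)))
    (f : σ → String → σ) (init : σ) :
    recipes.foldl (fun s recipe => (ingredientsOf recipe).foldl f s) init
      = (ingredStream recipes).foldl f init := by
  rw [ingredStream, List.flatMap_def, List.foldl_flatten, List.foldl_map]

theorem incr_step (i c : Int) :
    (PySem.Dict.mk [("dim", i), ("usageCount", c)]).modify "usageCount" 0 (· + 1)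
      = PySem.Dict.mk [("dim", i), ("usageCount", c + 1)] := by
  simp [PySem.Dict.modify, PySem.Dict.insert, PySem.Dict.getD, PySem.Dict.get?,
    PySem.Dict.contains]

theorem iterate_incr (i c : Int) (n : Nat) :
    (fun inner : PySem.Dict String Int => inner.modify "usageCount" 0 (· + 1))^[n]
      (PySem.Dict.mk [("dim", i), ("usageCount", c)])
      = PySem.Dict.mk [("dim", i), ("usageCount", c + n)] := by
  induction n generalizing c with
  | zero => simp
  | succ k ih =>
      rw [Function.iterate_succ_apply]
      simp only [incr_step, ih (c + 1)]
      have h : c + 1 + (k : Int) = c + ((k : Nat) + 1 : Nat) := by push_cast; ring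
      rw [h]

theorem getD_foldl_modify_iterate {κ ν : Type} [BEq κ] [LawfulBEq κ]
    (l : List κ) (f : ν → ν) (d0 : ν) (d : PySem.Dict κ ν) (k : κ) :
    (l.foldl (fun d x => d.modify x d0 f) d).getD k d0 = f^[l.count k] (d.getD k d0) := by
  induction l generalizing d with
  | nil => simp
  | cons x xs ih =>
      simp only [List.foldl_cons, ih, List.count_cons]
      by_cases hx : x = k
      · subst hx
        simp [PySem.Dict.getD_modify_self, Function.iterate_succ_apply]
      · rw [PySem.Dict.getD_modify_of_ne d d0 f (fun a => hx a.symm)]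
        simp [hx]

theorem genIngredMap_spec_aux (recipes : List (List (String × List String))) :
    genIngredMap recipes = genIngredMap_alt recipes := by
  unfold genIngredMap genIngredMap_alt
  simp only [nested_foldl_eq_stream, PySem.Set.empty, ← PySem.Set.ofList_eq_foldl,
    PySem.Dict.foldl_insert_getD_add_one_eq_counter, PySem.Dict.keys_counter]
  set L : List String := ingredStream recipes with hL
  set S : List String := PySem.List.sorted (PySem.Set.ofList L) (fun x => x) false with hS
  have hpw : S.Pairwise (· < ·) := PySem.List.sorted_ofList_pairwise_lt L
  have hnd : S.Nodup := hpw.imp (fun h => ne_of_lt h)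
  have hmemS : ∀ y ∈ L, y ∈ S := by
    intro y hy
    rw [hS, PySem.List.mem_sorted, PySem.Set.mem_ofList]
    exact hy
  -- A's index loop over range(len(ingreds)) is the fold over enumerate(S)
  have hm0 : (PySem.List.pyRange 0 (PySem.List.len S) 1).foldl
      (fun d x => d.insert (PySem.List.pyGetD S x "")
        (PySem.Dict.mk [("dim", x), ("usageCount", 0)])) PySem.Dict.empty
      = (PySem.List.enumerate S 0).foldl
        (fun d p => d.insert p.2 (PySem.Dict.mk [("dim", p.1), ("usageCount", 0)]))
        PySem.Dict.empty := by
    rw [PySem.List.enumerate_eq_map_pyRange S "", List.foldl_map]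
  rw [hm0]
  set m0 : PySem.Dict String (PySem.Dict String Int) :=
    (PySem.List.enumerate S 0).foldl
      (fun d p => d.insert p.2 (PySem.Dict.mk [("dim", p.1), ("usageCount", 0)]))
      PySem.Dict.empty with hm0def
  have hndmap : ((PySem.List.enumerate S 0).map (fun p => p.2)).Nodup := by
    rw [PySem.List.map_snd_enumerate]; exact hnd
  have hm0items : m0.items = (PySem.List.enumerate S 0).map
      (fun p => (p.2, PySem.Dict.mk [("dim", p.1), ("usageCount", 0)])) := by
    rw [hm0def, PySem.Dict.items_foldl_insert_fresh _ _ _ _ (fun a _ => by simp) hndmap]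
    rw [show (PySem.Dict.empty : PySem.Dict String (PySem.Dict String Int)).items = [] from rfl]
    simp
  have hm0keys : m0.keys = S := by
    rw [hm0def, PySem.Dict.keys_foldl_insert_key (PySem.List.enumerate S 0)
      (fun p : Int × String => p.2)
      (fun _ p => PySem.Dict.mk [("dim", p.1), ("usageCount", (0 : Int))]) PySem.Dict.empty,
      PySem.List.map_snd_enumerate]
    rw [show (PySem.Dict.empty : PySem.Dict String (PySem.Dict String Int)).keys = ([] : PySem.Set String) by simp]
    rw [PySem.Set.update_eq_append_of_disjoint _ _ hnd (by simp)]
    simp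
  set m : PySem.Dict String (PySem.Dict String Int) :=
    L.foldl (fun d ingred => d.modify ingred PySem.Dict.empty
      (fun inner => inner.modify "usageCount" 0 (· + 1))) m0 with hmdef
  have hmkeys : m.keys = S := by
    rw [hmdef, PySem.Dict.keys_foldl_modify L PySem.Dict.empty
      (fun _ _ => (fun inner => inner.modify "usageCount" 0 (· + 1))) m0, hm0keys,
      PySem.Set.update_eq_append_filter]
    have hfilter : (PySem.Set.ofList L).filter (fun y => !PySem.Set.contains S y) = [] := by
      rw [List.filter_eq_nil_iff]
      intro y hy
      have : y ∈ S := hmemS y ((PySem.Set.mem_ofList L y).mp hy)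
      simp [PySem.Set.contains, this]
    rw [hfilter]
    simp
  have hval : ∀ j : Nat, (hj : j < S.length) →
      m.getD S[j] PySem.Dict.empty
        = PySem.Dict.mk [("dim", (j : Int)), ("usageCount", (List.count S[j] L : Int))] := by
    intro j hj
    have hjm : j < (PySem.List.enumerate S 0).length := by
      rw [PySem.List.length_enumerate]; exact hj
    have hmem : (S[j], PySem.Dict.mk [("dim", (0 + (j : Int))), ("usageCount", (0 : Int))]) ∈ m0.items := by
      rw [hm0items]
      have := List.getElem_mem hjm
      rw [PySem.List.getElem_enumerate S 0 j hjm] at this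
      exact List.mem_map_of_mem this
    have hm0get : m0.getD S[j] PySem.Dict.empty
        = PySem.Dict.mk [("dim", (0 + (j : Int))), ("usageCount", (0 : Int))] :=
      PySem.Dict.getD_of_mem_items m0 hmem (hm0keys ▸ hnd) _
    rw [hmdef, getD_foldl_modify_iterate, hm0get, iterate_incr]
    norm_num
  -- items of both final dicts, pointwise
  rw [PySem.Dict.items_eq_map_keys m (hmkeys ▸ hnd) PySem.Dict.empty, hmkeys]
  rw [PySem.Dict.items_foldl_insert_fresh _ _ _ _ (fun a _ => by simp) hndmap]
  rw [show (PySem.Dict.empty : PySem.Dict String (List (String × Int))).items = [] from rfl]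
  simp only [List.nil_append, List.map_map]
  apply List.ext_getElem
  · simp [PySem.List.length_enumerate]
  · intro j h1 h2
    have hj : j < S.length := by simpa using h1
    have hjm : j < (PySem.List.enumerate S 0).length := by
      rw [PySem.List.length_enumerate]; exact hj
    simp only [List.getElem_map, Function.comp]
    rw [PySem.List.getElem_enumerate S 0 j hjm, hval j hj, PySem.Dict.getD_counter]
    simp

-- ===== VERDICT (by name: the statement is the Claim_ definition above) =====
theorem genIngredMap_spec : Claim_equal_genIngredMap := by
  intro recipes _ _
  exact genIngredMap_spec_aux recipes
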